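-- pv_equiv track=rewrite | github.com/JuliaYin970130/UNSW_Master | 9414/temporalPlanner.py | domain_constraints_update
-- ===== SOURCE A (Python) =====
-- def domain_constraints_update(condition, duration, day, day1, day2):
--     if condition == "starts-after":
--         return [(i, i + duration - 1) for i in range(100) if i >= day]
--     if condition == "starts-before":
--         return [(i, i + duration - 1) for i in range(100) if i <= day]
--     if condition == "ends-before":
--         return [(i, i + duration - 1) for i in range(100) if i + duration - 1 <= day]
--     if condition == "ends-after":
--         return [(i, i + duration - 1) for i in range(100) if i + duration - 1 >= day]
--     if condition == "starts-in":
--         return [(i, i + duration - 1) for i in range(100) if i >= day1 and i <= day2]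
--     if condition == "ends-in":
--         return [(i, i + duration - 1) for i in range(100) if i + duration - 1 >= day1 and i + duration - 1 <= day2]
--     if condition == "between":
--         return [(i, i + duration - 1) for i in range(100) if i >= day1 and i + duration - 1 <= day2]
-- ===== SOURCE B (Python) =====
-- def domain_constraints_update(condition, duration, day, day1, day2):
--     # compute the closed-form start range [lo, hi] per condition, then emit it directly
--     if condition == "starts-after":
--         lo, hi = max(0, day), 99
--     elif condition == "starts-before":
--         lo, hi = 0, min(99, day)
--     elif condition == "ends-before":
--         lo, hi = 0, min(99, day - duration + 1)
--     elif condition == "ends-after":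
--         lo, hi = max(0, day - duration + 1), 99
--     elif condition == "starts-in":
--         lo, hi = max(0, day1), min(99, day2)
--     elif condition == "ends-in":
--         lo, hi = max(0, day1 - duration + 1), min(99, day2 - duration + 1)
--     elif condition == "between":
--         lo, hi = max(0, day1), min(99, day2 - duration + 1)
--     else:
--         return None
--     return [(i, i + duration - 1) for i in range(lo, hi + 1)]
-- ===== Notes on version B (the rewrite author's own statement) =====
-- stated objective: faster
-- what changed: B computes the valid start range [lo, hi] in closed form per condition and emits only those starts, instead of scanning all 100 candidates and filtering.
-- outside the precondition, e.g. on domain_constraints_update('starts-in', 3, None, 200, None): A returns [], B raises TypeError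
import Mathlib
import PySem

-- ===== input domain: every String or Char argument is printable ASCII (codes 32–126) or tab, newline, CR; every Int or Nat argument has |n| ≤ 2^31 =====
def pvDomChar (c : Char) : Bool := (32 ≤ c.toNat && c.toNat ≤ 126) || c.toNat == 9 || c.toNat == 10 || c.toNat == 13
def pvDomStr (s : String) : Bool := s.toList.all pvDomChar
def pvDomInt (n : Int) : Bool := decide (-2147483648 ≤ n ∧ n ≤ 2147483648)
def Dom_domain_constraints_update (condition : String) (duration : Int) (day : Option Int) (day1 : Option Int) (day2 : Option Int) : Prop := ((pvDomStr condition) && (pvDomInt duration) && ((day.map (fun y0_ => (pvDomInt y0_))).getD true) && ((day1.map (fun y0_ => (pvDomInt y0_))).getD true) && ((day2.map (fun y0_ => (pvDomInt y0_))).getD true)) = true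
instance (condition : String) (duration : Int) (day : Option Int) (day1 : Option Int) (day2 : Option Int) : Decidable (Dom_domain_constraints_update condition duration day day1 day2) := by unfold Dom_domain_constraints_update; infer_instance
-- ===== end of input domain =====

-- B computes each condition's valid start range [lo, hi] in closed form and emits only those
-- starts, instead of scanning all 100 candidates with a filter (objective: faster, constant-factor).

-- ===== PORT A =====
-- Comparisons with None raise TypeError in Python; Pre_ guarantees the option a taken branch
-- reads is `some`, so `.getD 0` is exact on Pre_.
def domain_constraints_update (condition : String) (duration : Int) (day : Option Int) (day1 : Option Int) (day2 : Option Int) : Option (List (Int × Int)) :=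
  let d := day.getD 0
  let d1 := day1.getD 0
  let d2 := day2.getD 0
  if condition = "starts-after" then
    some (((PySem.List.pyRange 0 100 1).filter (fun i => decide (i ≥ d))).map (fun i => (i, i + duration - 1)))
  else if condition = "starts-before" then
    some (((PySem.List.pyRange 0 100 1).filter (fun i => decide (i ≤ d))).map (fun i => (i, i + duration - 1)))
  else if condition = "ends-before" then
    some (((PySem.List.pyRange 0 100 1).filter (fun i => decide (i + duration - 1 ≤ d))).map (fun i => (i, i + duration - 1)))
  else if condition = "ends-after" then
    some (((PySem.List.pyRange 0 100 1).filter (fun i => decide (i + duration - 1 ≥ d))).map (fun i => (i, i + duration - 1)))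
  else if condition = "starts-in" then
    some (((PySem.List.pyRange 0 100 1).filter (fun i => decide (i ≥ d1) && decide (i ≤ d2))).map (fun i => (i, i + duration - 1)))
  else if condition = "ends-in" then
    some (((PySem.List.pyRange 0 100 1).filter (fun i => decide (i + duration - 1 ≥ d1) && decide (i + duration - 1 ≤ d2))).map (fun i => (i, i + duration - 1)))
  else if condition = "between" then
    some (((PySem.List.pyRange 0 100 1).filter (fun i => decide (i ≥ d1) && decide (i + duration - 1 ≤ d2))).map (fun i => (i, i + duration - 1)))
  else none

-- ===== PORT B =====
-- the shared final comprehension of Source B: [(i, i + duration - 1) for i in range(lo, hi + 1)]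
def pvEmit (duration lo hi : Int) : Option (List (Int × Int)) :=
  some ((PySem.List.pyRange lo (hi + 1) 1).map (fun i => (i, i + duration - 1)))

def domain_constraints_update_alt (condition : String) (duration : Int) (day : Option Int) (day1 : Option Int) (day2 : Option Int) : Option (List (Int × Int)) :=
  let d := day.getD 0
  let d1 := day1.getD 0
  let d2 := day2.getD 0
  if condition = "starts-after" then pvEmit duration (max 0 d) 99
  else if condition = "starts-before" then pvEmit duration 0 (min 99 d)
  else if condition = "ends-before" then pvEmit duration 0 (min 99 (d - duration + 1))
  else if condition = "ends-after" then pvEmit duration (max 0 (d - duration + 1)) 99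
  else if condition = "starts-in" then pvEmit duration (max 0 d1) (min 99 d2)
  else if condition = "ends-in" then pvEmit duration (max 0 (d1 - duration + 1)) (min 99 (d2 - duration + 1))
  else if condition = "between" then pvEmit duration (max 0 d1) (min 99 (d2 - duration + 1))
  else none

-- ===== PRECONDITION & SPEC =====
-- Pre_ excludes inputs where a day argument the matched condition compares against is None:
-- there Python A raises TypeError, except in degenerate short-circuit cases (e.g. 'starts-in'
-- with day1 > 99 and day2 = None) where A returns [] but B raises computing its bounds.
def Pre_domain_constraints_update (condition : String) (duration : Int) (day : Option Int) (day1 : Option Int) (day2 : Option Int) : Prop :=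
  ((condition = "starts-after" ∨ condition = "starts-before" ∨ condition = "ends-before" ∨ condition = "ends-after") → day.isSome) ∧
  ((condition = "starts-in" ∨ condition = "ends-in" ∨ condition = "between") → (day1.isSome ∧ day2.isSome))
instance (condition : String) (duration : Int) (day : Option Int) (day1 : Option Int) (day2 : Option Int) : Decidable (Pre_domain_constraints_update condition duration day day1 day2) := by unfold Pre_domain_constraints_update; infer_instance

def pvWitness_domain_constraints_update : String × Int × Option Int × Option Int × Option Int := ("starts-after", 3, some 5, none, none)

def Spec_domain_constraints_update (condition : String) (duration : Int) (day : Option Int) (day1 : Option Int) (day2 : Option Int) (out : Option (List (Int × Int))) : Prop := out = domain_constraints_update_alt condition duration day day1 day2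
instance (condition : String) (duration : Int) (day : Option Int) (day1 : Option Int) (day2 : Option Int) (out : Option (List (Int × Int))) : Decidable (Spec_domain_constraints_update condition duration day day1 day2 out) := by unfold Spec_domain_constraints_update; infer_instance

-- ===== CLAIM (what is proved, stated in full; the proofs are below) =====
def Claim_equal_domain_constraints_update : Prop := ∀ (condition : String) (duration : Int) (day : Option Int) (day1 : Option Int) (day2 : Option Int), Dom_domain_constraints_update condition duration day day1 day2 → Pre_domain_constraints_update condition duration day day1 day2 → Spec_domain_constraints_update condition duration day day1 day2 (domain_constraints_update condition duration day day1 day2)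

-- ===== LEMMAS AND PROOFS =====

-- filtering an ascending unit range by an interval predicate yields the clipped range
theorem pvFilterRangeInterval (lo hi : Int) : ∀ (n : ℕ) (a b : Int), (b - a).toNat = n →
    (PySem.List.pyRange a b 1).filter (fun i => decide (lo ≤ i ∧ i ≤ hi))
      = PySem.List.pyRange (max a lo) (min b (hi + 1)) 1 := by
  intro n
  induction n with
  | zero =>
    intro a b h
    rw [PySem.List.pyRange_one_eq_nil (by omega), PySem.List.pyRange_one_eq_nil (by omega)]
    rfl
  | succ k ih =>
    intro a b h
    have hab : a < b := by omega
    rw [PySem.List.pyRange_one_cons hab, List.filter_cons]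
    by_cases hp : lo ≤ a ∧ a ≤ hi
    · rw [if_pos (by simpa using hp)]
      rw [ih (a + 1) b (by omega)]
      have h1 : max a lo = a := by omega
      have h2 : max (a + 1) lo = a + 1 := by omega
      have h3 : a < min b (hi + 1) := by omega
      rw [h1, h2, PySem.List.pyRange_one_cons h3]
    · rw [if_neg (by simpa using hp)]
      rw [ih (a + 1) b (by omega)]
      by_cases hlo : lo ≤ a
      · have hhi : ¬ a ≤ hi := fun hc => hp ⟨hlo, hc⟩
        rw [PySem.List.pyRange_one_eq_nil (by omega), PySem.List.pyRange_one_eq_nil (by omega)]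
      · have : max (a + 1) lo = max a lo := by omega
        rw [this]

-- one branch of the equivalence: A's filtered scan equals B's clipped emit
theorem pvBranch (p : Int → Bool) (lo hi : Int) (duration : Int)
    (h : ∀ x : Int, 0 ≤ x → x < 100 → p x = decide (lo ≤ x ∧ x ≤ hi))
    (lo' hi' : Int) (h2 : max 0 lo = lo') (h3 : min 100 (hi + 1) = hi' + 1) :
    some (((PySem.List.pyRange 0 100 1).filter p).map (fun i => (i, i + duration - 1)))
      = pvEmit duration lo' hi' := by
  have hc : (PySem.List.pyRange 0 100 1).filter p
      = (PySem.List.pyRange 0 100 1).filter (fun i => decide (lo ≤ i ∧ i ≤ hi)) := by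
    apply List.filter_congr
    intro x hx
    have hm := PySem.List.mem_pyRange_one.mp hx
    exact h x hm.1 hm.2
  rw [pvEmit, hc, pvFilterRangeInterval lo hi 100 0 100 rfl, h2, h3]

-- ===== VERDICT (by name: the statement is the Claim_ definition above) =====
theorem domain_constraints_update_spec : Claim_equal_domain_constraints_update := by
  intro condition duration day day1 day2 _ hpre
  unfold Spec_domain_constraints_update domain_constraints_update domain_constraints_update_alt
  simp only []
  split_ifs with h1 h2 h3 h4 h5 h6 h7
  · obtain ⟨d, hd⟩ := Option.isSome_iff_exists.mp (hpre.1 (Or.inl h1))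
    subst hd
    simp only [Option.getD_some]
    exact pvBranch _ d 99 duration
      (by intro x hx1 hx2; simp only [ge_iff_le, decide_eq_decide]; omega)
      _ _ (by omega) (by omega)
  · obtain ⟨d, hd⟩ := Option.isSome_iff_exists.mp (hpre.1 (Or.inr (Or.inl h2)))
    subst hd
    simp only [Option.getD_some]
    exact pvBranch _ 0 d duration
      (by intro x hx1 hx2; simp only [decide_eq_decide]; omega)
      _ _ (by omega) (by omega)
  · obtain ⟨d, hd⟩ := Option.isSome_iff_exists.mp (hpre.1 (Or.inr (Or.inr (Or.inl h3))))
    subst hd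
    simp only [Option.getD_some]
    exact pvBranch _ 0 (d - duration + 1) duration
      (by intro x hx1 hx2; simp only [decide_eq_decide]; omega)
      _ _ (by omega) (by omega)
  · obtain ⟨d, hd⟩ := Option.isSome_iff_exists.mp (hpre.1 (Or.inr (Or.inr (Or.inr h4))))
    subst hd
    simp only [Option.getD_some]
    exact pvBranch _ (d - duration + 1) 99 duration
      (by intro x hx1 hx2; simp only [ge_iff_le, decide_eq_decide]; omega)
      _ _ (by omega) (by omega)
  · obtain ⟨hs1, hs2⟩ := hpre.2 (Or.inl h5)
    obtain ⟨e1, hd1⟩ := Option.isSome_iff_exists.mp hs1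
    obtain ⟨e2, hd2⟩ := Option.isSome_iff_exists.mp hs2
    subst hd1; subst hd2
    simp only [Option.getD_some]
    exact pvBranch _ e1 e2 duration
      (by intro x hx1 hx2; rw [Bool.eq_iff_iff]; simp only [Bool.and_eq_true, decide_eq_true_eq]; try omega)
      _ _ (by omega) (by omega)
  · obtain ⟨hs1, hs2⟩ := hpre.2 (Or.inr (Or.inl h6))
    obtain ⟨e1, hd1⟩ := Option.isSome_iff_exists.mp hs1
    obtain ⟨e2, hd2⟩ := Option.isSome_iff_exists.mp hs2
    subst hd1; subst hd2
    simp only [Option.getD_some]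
    exact pvBranch _ (e1 - duration + 1) (e2 - duration + 1) duration
      (by intro x hx1 hx2; rw [Bool.eq_iff_iff]; simp only [Bool.and_eq_true, decide_eq_true_eq]; try omega)
      _ _ (by omega) (by omega)
  · obtain ⟨hs1, hs2⟩ := hpre.2 (Or.inr (Or.inr h7))
    obtain ⟨e1, hd1⟩ := Option.isSome_iff_exists.mp hs1
    obtain ⟨e2, hd2⟩ := Option.isSome_iff_exists.mp hs2
    subst hd1; subst hd2
    simp only [Option.getD_some]
    exact pvBranch _ e1 (e2 - duration + 1) duration
      (by intro x hx1 hx2; rw [Bool.eq_iff_iff]; simp only [Bool.and_eq_true, decide_eq_true_eq]; try omega)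
      _ _ (by omega) (by omega)
  · rfl
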